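-- pv_equiv track=rewrite | github.com/sweetpotato15/Algorithm_Study | 백준/Silver/11497. 통나무 건너뛰기/통나무 건너뛰기.py | tree_level
-- ===== SOURCE A (Python) =====
-- def tree_level(n, array):
--     array.sort()
--     answer = [0] * n
--     for i in range(0,n//2):
--         answer[i] = array[2*i]
--         answer[-(i+1)] = array[2*i+1]
--     if n % 2 == 1:
--         answer[n//2] = array[-1]
--
--     diff = [abs(answer[i] - answer[i-1]) for i in range(1,n)]
--     return max(max(diff), answer[-1] - answer[0])
-- ===== SOURCE B (Python) =====
-- # Simpler: compute the circle gaps directly from the sorted list instead of building the zigzag arrangement.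
-- def tree_level(n, array):
--     array.sort()
--     k = n // 2
--     gaps = [array[i + 2] - array[i] for i in range(2 * k - 2)]
--     gaps.append(array[1] - array[0])
--     if n % 2 == 1:
--         gaps.append(array[-1] - array[2 * k - 2])
--     return max(gaps)
-- ===== Notes on version B (the rewrite author's own statement) =====
-- stated objective: simpler
-- what changed: Instead of building the zigzag seating array in place and taking abs-diffs of its neighbours, B computes the circle gaps directly on the sorted list as array[i+2]-array[i] plus the wrap gap array[1]-array[0] (and the middle term array[-1]-array[2*(n//2)-2] for odd n) and returns their max.
import Mathlib
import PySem

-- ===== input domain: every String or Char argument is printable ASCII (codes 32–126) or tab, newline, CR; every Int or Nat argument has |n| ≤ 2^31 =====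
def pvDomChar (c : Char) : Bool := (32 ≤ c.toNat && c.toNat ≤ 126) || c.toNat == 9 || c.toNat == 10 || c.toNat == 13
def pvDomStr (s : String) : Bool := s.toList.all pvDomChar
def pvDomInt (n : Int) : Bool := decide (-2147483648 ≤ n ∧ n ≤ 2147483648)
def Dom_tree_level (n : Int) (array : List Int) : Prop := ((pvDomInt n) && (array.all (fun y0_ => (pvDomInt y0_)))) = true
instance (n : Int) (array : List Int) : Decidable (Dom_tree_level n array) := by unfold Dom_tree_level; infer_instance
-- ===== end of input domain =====

-- B computes the circle gaps directly on the sorted list instead of building the zigzag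
-- arrangement in place (simpler decomposition, same cost). Python A sorts `array` in place;
-- the equivalence proved here is about the RETURN value (Python B performs the same mutation).

-- ===== PORT A =====
def tree_level (n : Int) (array : List Int) : Int :=
  let a := PySem.List.sorted array (fun x => x) false
  let answer0 : List Int := List.replicate n.toNat 0
  let answer1 := (PySem.List.pyRange 0 (PySem.Int.floordiv n 2) 1).foldl
    (fun ans i =>
      PySem.List.pySetD
        (PySem.List.pySetD ans i (PySem.List.pyGetD a (2*i) 0))
        (-(i+1)) (PySem.List.pyGetD a (2*i+1) 0)) answer0
  let answer := if PySem.Int.mod n 2 = 1 then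
      PySem.List.pySetD answer1 (PySem.Int.floordiv n 2) (PySem.List.pyGetD a (-1) 0)
    else answer1
  let diff := (PySem.List.pyRange 1 n 1).map
    (fun i => |PySem.List.pyGetD answer i 0 - PySem.List.pyGetD answer (i-1) 0|)
  max ((PySem.List.max? diff (fun x => x)).getD 0)
    (PySem.List.pyGetD answer (-1) 0 - PySem.List.pyGetD answer 0 0)

-- ===== PORT B =====
def tree_level_alt (n : Int) (array : List Int) : Int :=
  let a := PySem.List.sorted array (fun x => x) false
  let k := PySem.Int.floordiv n 2
  let gaps := (PySem.List.pyRange 0 (2*k - 2) 1).map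
    (fun i => PySem.List.pyGetD a (i+2) 0 - PySem.List.pyGetD a i 0)
  let gaps := gaps ++ [PySem.List.pyGetD a 1 0 - PySem.List.pyGetD a 0 0]
  let gaps := if PySem.Int.mod n 2 = 1 then
      gaps ++ [PySem.List.pyGetD a (-1) 0 - PySem.List.pyGetD a (2*k - 2) 0]
    else gaps
  (PySem.List.max? gaps (fun x => x)).getD 0

-- ===== PRECONDITION & SPEC =====
-- Exactly the inputs on which Python A returns: for n < 2, max(diff) raises ValueError
-- (or answer[...] raises IndexError), and with fewer than 2*(n//2) logs the loop raises IndexError.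
def Pre_tree_level (n : Int) (array : List Int) : Prop :=
  2 ≤ n ∧ 2 * (n / 2) ≤ (array.length : Int)
instance (n : Int) (array : List Int) : Decidable (Pre_tree_level n array) := by
  unfold Pre_tree_level; infer_instance
def pvWitness_tree_level : Int × List Int := (2, [1, 3])
def Spec_tree_level (n : Int) (array : List Int) (out : Int) : Prop := out = tree_level_alt n array
instance (n : Int) (array : List Int) (out : Int) : Decidable (Spec_tree_level n array out) := by
  unfold Spec_tree_level; infer_instance

-- ===== CLAIM (what is proved, stated in full; the proofs are below) =====
def Claim_equal_tree_level : Prop := ∀ (n : Int) (array : List Int), Dom_tree_level n array → Pre_tree_level n array → Spec_tree_level n array (tree_level n array)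

-- ===== LEMMAS AND PROOFS =====

-- the zigzag arrangement A's loop builds, as an index function
def zf (a : List Int) (N k j : Nat) : Int :=
  if j < k then a.getD (2*j) 0
  else if N - k ≤ j ∧ j < N then a.getD (2*(N-1-j)+1) 0
  else 0

-- A's final `answer` list, as an index function
def af (a : List Int) (N j : Nat) : Int :=
  if N % 2 = 1 ∧ j = N/2 then a.getD (a.length - 1) 0 else zf a N (N/2) j

lemma sorted_getD_mono (a : List Int) (ha : a.Pairwise (· ≤ ·)) {i j : Nat}
    (hij : i ≤ j) (hj : j < a.length) : a.getD i 0 ≤ a.getD j 0 := by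
  have hi : i < a.length := lt_of_le_of_lt hij hj
  rw [List.getD_eq_getElem a 0 hi, List.getD_eq_getElem a 0 hj]
  rcases eq_or_lt_of_le hij with h | h
  · subst h; exact le_refl _
  · exact (List.pairwise_iff_getElem.mp ha) i j hi hj h

lemma pySetD_neg (xs : List Int) (k : Nat) (v : Int) (h : k + 1 ≤ xs.length) :
    PySem.List.pySetD xs (-((k:Int)+1)) v = xs.set (xs.length - (k+1)) v := by
  have h1 : PySem.List.pyIdx? xs.length (-((k:Int)+1)) = some (xs.length - (k+1)) := by
    simp [PySem.List.pyIdx?]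
    split_ifs <;> first | rfl | omega
  simp only [PySem.List.pySetD, PySem.List.pySet?, h1, Option.map_some, Option.getD_some]

lemma getD_set' (xs : List Int) (i : Nat) (v : Int) (j : Nat) :
    (xs.set i v).getD j 0 = if j = i ∧ i < xs.length then v else xs.getD j 0 := by
  simp [List.getD, List.getElem?_set]
  split_ifs <;> simp_all

lemma foldA_len_gen (l : List Int) (a : List Int) (init : List Int) :
    ((l.foldl
      (fun ans i =>
        PySem.List.pySetD
          (PySem.List.pySetD ans i (PySem.List.pyGetD a (2*i) 0))
          (-(i+1)) (PySem.List.pyGetD a (2*i+1) 0)) init)).length = init.length := by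
  induction l generalizing init with
  | nil => rfl
  | cons x t ih =>
      simp only [List.foldl_cons]
      rw [ih]
      simp [PySem.List.length_pySetD]

lemma foldA_char (a : List Int) (N k : Nat) (hkN : 2*k ≤ N) (hka : 2*k ≤ a.length) (j : Nat) :
    (((PySem.List.pyRange 0 (k:Int) 1).foldl
      (fun ans i =>
        PySem.List.pySetD
          (PySem.List.pySetD ans i (PySem.List.pyGetD a (2*i) 0))
          (-(i+1)) (PySem.List.pyGetD a (2*i+1) 0)) (List.replicate N 0))).getD j 0
    = zf a N k j := by
  induction k generalizing j with
  | zero =>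
      rw [PySem.List.pyRange_one_eq_nil (by omega)]
      simp only [List.foldl_nil, zf]
      rw [if_neg (by omega), if_neg (by omega)]
      by_cases hj : j < N
      · simp [hj]
      · simp [List.length_replicate, Nat.le_of_not_lt hj]
  | succ k ih =>
      rw [show (((k+1:Nat)):Int) = (k:Int) + 1 by push_cast; ring,
          PySem.List.pyRange_one_succ_right (by positivity), List.foldl_append]
      set P := ((PySem.List.pyRange 0 (k:Int) 1).foldl
        (fun ans i =>
          PySem.List.pySetD
            (PySem.List.pySetD ans i (PySem.List.pyGetD a (2*i) 0))
            (-(i+1)) (PySem.List.pyGetD a (2*i+1) 0)) (List.replicate N 0)) with hPdef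
      have hP : P.length = N := by rw [hPdef, foldA_len_gen, List.length_replicate]
      simp only [List.foldl_cons, List.foldl_nil]
      have c1 : (2*(k:Int)) = ((2*k : Nat) : Int) := by push_cast; ring
      rw [c1]
      have c2 : ((2*k : Nat):Int)+1 = ((2*k+1 : Nat) : Int) := by push_cast; ring
      rw [c2, PySem.List.pyGetD_natCast, PySem.List.pyGetD_natCast,
          PySem.List.pySetD_natCast, pySetD_neg _ _ _ (by simp [hP]; omega)]
      simp only [List.length_set, hP]
      rw [getD_set', getD_set']
      simp only [List.length_set, hP]
      have hik : ∀ j', P.getD j' 0 = zf a N k j' := fun j' => ih (by omega) (by omega) j'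
      by_cases h1 : j = N - (k+1)
      · rw [if_pos ⟨h1, by omega⟩]
        simp only [zf]
        rw [if_neg (by omega), if_pos (by constructor <;> omega)]
        congr 2
        omega
      · rw [if_neg (by simp [h1])]
        by_cases h2 : j = k
        · rw [if_pos ⟨h2, by omega⟩]
          simp only [zf]
          rw [if_pos (by omega), h2]
        · rw [if_neg (by simp [h2]), hik]
          simp only [zf]
          split_ifs <;> first | rfl | omega

lemma af_lt (a : List Int) (N j : Nat) (h : j < N/2) :
    af a N j = a.getD (2*j) 0 := by
  rw [af, if_neg (by omega), zf, if_pos h]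

lemma af_mid_odd (a : List Int) (N : Nat) (h : N % 2 = 1) :
    af a N (N/2) = a.getD (a.length - 1) 0 := by
  rw [af, if_pos ⟨h, rfl⟩]

lemma af_hi (a : List Int) (N j : Nat) (h1 : N/2 ≤ j) (h2 : j < N)
    (h3 : ¬(N % 2 = 1 ∧ j = N/2)) :
    af a N j = a.getD (2*(N-1-j)+1) 0 := by
  rw [af, if_neg h3, zf, if_neg (by omega), if_pos (by constructor <;> omega)]

lemma portA_eq (n : Int) (array : List Int) (h2 : 2 ≤ n)
    (hm : 2 * (n / 2) ≤ (array.length : Int)) :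
    tree_level n array =
      max ((PySem.List.max? ((List.range (n.toNat - 1)).map
            (fun t => |af (PySem.List.sorted array (fun x => x) false) n.toNat (t+1)
                       - af (PySem.List.sorted array (fun x => x) false) n.toNat t|)) (fun x => x)).getD 0)
        ((PySem.List.sorted array (fun x => x) false).getD 1 0
          - (PySem.List.sorted array (fun x => x) false).getD 0 0) := by
  set a := PySem.List.sorted array (fun x => x) false with hadef
  have hal : a.length = array.length := PySem.List.length_sorted ..
  set N := n.toNat with hNdef
  have hn : (N:Int) = n := Int.toNat_of_nonneg (by omega)
  have hN2 : 2 ≤ N := by omega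
  have hka : 2*(N/2) ≤ a.length := by
    have : (n / 2 : Int) = ((N / 2 : Nat) : Int) := by omega
    omega
  have hfd : PySem.Int.floordiv n 2 = ((N/2 : Nat) : Int) := by
    rw [PySem.Int.floordiv_eq_ediv_of_pos (by omega)]
    omega
  have hmod : (PySem.Int.mod n 2 = 1) ↔ (N % 2 = 1) := by
    rw [PySem.Int.mod_eq_emod_of_pos (by omega)]
    omega
  unfold tree_level
  rw [← hadef, ← hNdef, hfd]
  dsimp only
  set answer1 := ((PySem.List.pyRange 0 ((N/2 : Nat) : Int) 1).foldl
    (fun ans i =>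
      PySem.List.pySetD
        (PySem.List.pySetD ans i (PySem.List.pyGetD a (2*i) 0))
        (-(i+1)) (PySem.List.pyGetD a (2*i+1) 0)) (List.replicate N 0)) with ha1def
  have h1len : answer1.length = N := by rw [ha1def, foldA_len_gen, List.length_replicate]
  have h1char : ∀ j, answer1.getD j 0 = zf a N (N/2) j :=
    fun j => foldA_char a N (N/2) (by omega) hka j
  set answer := (if PySem.Int.mod n 2 = 1 then
      PySem.List.pySetD answer1 ((N/2 : Nat) : Int) (PySem.List.pyGetD a (-1) 0)
    else answer1) with hansdef
  have hlen : answer.length = N := by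
    rw [hansdef]
    split
    · rw [PySem.List.pySetD_natCast, List.length_set, h1len]
    · exact h1len
  have hchar : ∀ j, answer.getD j 0 = af a N j := by
    intro j
    rw [hansdef, af]
    by_cases hodd : N % 2 = 1
    · rw [if_pos (hmod.mpr hodd), PySem.List.pySetD_natCast]
      have hlast : PySem.List.pyGetD a (-1) 0 = a.getD (a.length - 1) 0 := by
        have hne : a ≠ [] := by
          intro h; rw [h] at hal; simp at hal; omega
        rw [PySem.List.pyGetD_neg_one a 0 hne, List.getLast_eq_getElem,
            List.getD_eq_getElem a 0 (by omega)]
      rw [hlast, getD_set', h1len]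
      by_cases hj : j = N/2
      · rw [if_pos ⟨hj, by omega⟩, if_pos ⟨hodd, hj⟩]
      · rw [if_neg (by simp [hj]), if_neg (by simp [hj, hodd]), h1char]
    · rw [if_neg (fun hc => hodd (hmod.mp hc)), if_neg (by simp [hodd]), h1char]
  have hgetc : ∀ (t : Nat), PySem.List.pyGetD answer (t:Int) 0 = af a N t := by
    intro t
    rw [PySem.List.pyGetD_natCast]
    exact hchar t
  have hneg1 : PySem.List.pyGetD answer (-1) 0 = af a N (N-1) := by
    have hne : answer ≠ [] := by intro h; rw [h] at hlen; simp at hlen; omega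
    rw [PySem.List.pyGetD_neg_one answer 0 hne, List.getLast_eq_getElem, ← hchar (N-1),
        List.getD_eq_getElem answer 0 (by rw [hlen]; omega)]
    congr 1
    omega
  have hdiff : (PySem.List.pyRange 1 n 1).map
      (fun i => |PySem.List.pyGetD answer i 0 - PySem.List.pyGetD answer (i-1) 0|)
    = (List.range (N - 1)).map (fun t => |af a N (t+1) - af a N t|) := by
    rw [PySem.List.pyRange_one, List.map_map]
    have hcnt : (n - 1).toNat = N - 1 := by omega
    rw [hcnt]
    apply List.map_congr_left
    intro t _
    simp only [Function.comp]
    have e1 : (1 : Int) + (t:Nat) = ((t+1 : Nat) : Int) := by push_cast; ring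
    rw [e1, hgetc (t+1)]
    rw [show ((t+1 : Nat) : Int) - 1 = ((t : Nat) : Int) by omega, hgetc t]
  have hafN1 : af a N (N-1) = a.getD 1 0 := by
    rw [af, zf]
    rw [if_neg (by omega), if_neg (by omega), if_pos (by constructor <;> omega)]
    congr 1
    omega
  have haf0 : af a N 0 = a.getD 0 0 := by
    rw [af, zf]
    rw [if_neg (by omega), if_pos (by omega)]
  rw [hdiff, hneg1, hafN1]
  have h0 : PySem.List.pyGetD answer 0 0 = af a N 0 := by
    have := hgetc 0
    simpa using this
  rw [h0, haf0]

lemma portB_eq (n : Int) (array : List Int) (h2 : 2 ≤ n)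
    (hm : 2 * (n / 2) ≤ (array.length : Int)) :
    tree_level_alt n array =
      (PySem.List.max? ((List.range (2*(n.toNat/2) - 2)).map
          (fun j => (PySem.List.sorted array (fun x => x) false).getD (j+2) 0
                    - (PySem.List.sorted array (fun x => x) false).getD j 0)
        ++ [(PySem.List.sorted array (fun x => x) false).getD 1 0
             - (PySem.List.sorted array (fun x => x) false).getD 0 0]
        ++ (if n.toNat % 2 = 1 then
              [(PySem.List.sorted array (fun x => x) false).getD ((PySem.List.sorted array (fun x => x) false).length - 1) 0
               - (PySem.List.sorted array (fun x => x) false).getD (2*(n.toNat/2) - 2) 0]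
            else [])) (fun x => x)).getD 0 := by
  set a := PySem.List.sorted array (fun x => x) false with hadef
  have hal : a.length = array.length := PySem.List.length_sorted ..
  set N := n.toNat with hNdef
  have hn : (N:Int) = n := Int.toNat_of_nonneg (by omega)
  have hN2 : 2 ≤ N := by omega
  have hka : 2*(N/2) ≤ a.length := by
    have : (n / 2 : Int) = ((N / 2 : Nat) : Int) := by omega
    omega
  have hfd : PySem.Int.floordiv n 2 = ((N/2 : Nat) : Int) := by
    rw [PySem.Int.floordiv_eq_ediv_of_pos (by omega)]
    omega
  have hmod : (PySem.Int.mod n 2 = 1) ↔ (N % 2 = 1) := by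
    rw [PySem.Int.mod_eq_emod_of_pos (by omega)]
    omega
  unfold tree_level_alt
  rw [← hadef, hfd]
  dsimp only
  have hmap : (PySem.List.pyRange 0 (2*((N/2 : Nat) : Int) - 2) 1).map
      (fun i => PySem.List.pyGetD a (i+2) 0 - PySem.List.pyGetD a i 0)
    = (List.range (2*(N/2) - 2)).map (fun j => a.getD (j+2) 0 - a.getD j 0) := by
    rw [PySem.List.pyRange_one, List.map_map]
    have : (2*((N/2 : Nat) : Int) - 2 - 0).toNat = 2*(N/2) - 2 := by omega
    rw [this]
    apply List.map_congr_left
    intro t _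
    simp only [Function.comp]
    rw [show (0 : Int) + (t:Nat) + 2 = ((t+2 : Nat) : Int) by push_cast; ring,
        show (0 : Int) + (t:Nat) = ((t : Nat) : Int) by omega,
        PySem.List.pyGetD_natCast, PySem.List.pyGetD_natCast]
  have h1 : PySem.List.pyGetD a 1 0 = a.getD 1 0 := by
    rw [show (1:Int) = ((1:Nat):Int) from rfl, PySem.List.pyGetD_natCast]
  have h0 : PySem.List.pyGetD a 0 0 = a.getD 0 0 := by
    rw [show (0:Int) = ((0:Nat):Int) from rfl, PySem.List.pyGetD_natCast]
  have hne : a ≠ [] := by intro h; rw [h] at hal; simp at hal; omega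
  have hlast : PySem.List.pyGetD a (-1) 0 = a.getD (a.length - 1) 0 := by
    rw [PySem.List.pyGetD_neg_one a 0 hne, List.getLast_eq_getElem,
        List.getD_eq_getElem a 0 (by omega)]
  have h2k : PySem.List.pyGetD a (2*((N/2 : Nat) : Int) - 2) 0 = a.getD (2*(N/2) - 2) 0 := by
    rw [show 2*((N/2 : Nat) : Int) - 2 = ((2*(N/2) - 2 : Nat) : Int) by omega,
        PySem.List.pyGetD_natCast]
  rw [hmap, h1, h0]
  by_cases hodd : N % 2 = 1
  · rw [if_pos (hmod.mpr hodd), if_pos hodd, hlast, h2k, List.append_assoc]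
  · rw [if_neg (fun hc => hodd (hmod.mp hc)), if_neg hodd, List.append_nil]

lemma core_eq (a : List Int) (N : Nat) (ha : a.Pairwise (· ≤ ·)) (h2 : 2 ≤ N)
    (hm : 2*(N/2) ≤ a.length) :
    max ((PySem.List.max? ((List.range (N - 1)).map
          (fun t => |af a N (t+1) - af a N t|)) (fun x => x)).getD 0)
      (a.getD 1 0 - a.getD 0 0)
    = (PySem.List.max? ((List.range (2*(N/2) - 2)).map
          (fun j => a.getD (j+2) 0 - a.getD j 0)
        ++ [a.getD 1 0 - a.getD 0 0]
        ++ (if N % 2 = 1 then [a.getD (a.length - 1) 0 - a.getD (2*(N/2) - 2) 0] else []))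
        (fun x => x)).getD 0 := by
  set k := N/2 with hk
  have hk1 : 1 ≤ k := by omega
  have hmlen : 2*k ≤ a.length := hm
  set w := a.getD 1 0 - a.getD 0 0 with hw
  set dfun := (fun t => |af a N (t+1) - af a N t|) with hdfun
  set gfun := (fun j => a.getD (j+2) 0 - a.getD j 0) with hgfun
  set diffL := (List.range (N - 1)).map dfun with hdiffL
  set gL := ((List.range (2*k - 2)).map gfun ++ [w]
      ++ (if N % 2 = 1 then [a.getD (a.length - 1) 0 - a.getD (2*k - 2) 0] else [])) with hgL
  -- membership helpers
  have hw_mem : w ∈ gL := by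
    rw [hgL]; simp
  have hg_mem : ∀ j, j < 2*k-2 → gfun j ∈ gL := by
    intro j hj
    rw [hgL]
    simp only [List.mem_append, List.mem_map, List.mem_range]
    exact Or.inl (Or.inl ⟨j, hj, rfl⟩)
  have hx_mem : N % 2 = 1 → (a.getD (a.length - 1) 0 - a.getD (2*k - 2) 0) ∈ gL := by
    intro hodd
    rw [hgL]
    simp [hodd]
  have hd_mem : ∀ t, t < N-1 → dfun t ∈ diffL := by
    intro t ht
    rw [hdiffL]
    simp only [List.mem_map, List.mem_range]
    exact ⟨t, ht, rfl⟩
  -- evaluating dfun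
  have hmono : ∀ {i j : Nat}, i ≤ j → j < a.length → a.getD i 0 ≤ a.getD j 0 :=
    fun h h' => sorted_getD_mono a ha h h'
  -- case 1: t+1 < k
  have hd1 : ∀ t, t+1 < k → dfun t = gfun (2*t) := by
    intro t ht
    rw [hdfun, hgfun]
    simp only
    rw [af_lt a N (t+1) (by omega), af_lt a N t (by omega),
        abs_of_nonneg (sub_nonneg.mpr (hmono (by omega) (by omega))),
        show 2*(t+1) = 2*t+2 by ring]
  -- case 2: t+1 = k, N odd
  have hd2o : N % 2 = 1 → dfun (k-1) = a.getD (a.length - 1) 0 - a.getD (2*k - 2) 0 := by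
    intro hodd
    rw [hdfun]
    simp only
    rw [show k-1+1 = k by omega, af_mid_odd a N hodd, af_lt a N (k-1) (by omega),
        abs_of_nonneg (sub_nonneg.mpr (hmono (by omega) (by omega))),
        show 2*(k-1) = 2*k-2 by omega]
  -- case 2 even: t+1 = k
  have hd2e : N % 2 = 0 → dfun (k-1) = a.getD (2*k-1) 0 - a.getD (2*k-2) 0 := by
    intro heven
    rw [hdfun]
    simp only
    rw [show k-1+1 = k by omega, af_hi a N k (by omega) (by omega) (by omega),
       af_lt a N (k-1) (by omega),
        show 2*(N-1-k)+1 = 2*k-1 by omega, show 2*(k-1) = 2*k-2 by omega,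
        abs_of_nonneg (sub_nonneg.mpr (hmono (by omega) (by omega)))]
  -- case 3: N odd, t = k
  have hd3 : N % 2 = 1 → dfun k = a.getD (a.length - 1) 0 - a.getD (2*k-1) 0 := by
    intro hodd
    rw [hdfun]
    simp only
    rw [af_hi a N (k+1) (by omega) (by omega) (by omega), af_mid_odd a N hodd,
        show 2*(N-1-(k+1))+1 = 2*k-1 by omega, abs_sub_comm,
        abs_of_nonneg (sub_nonneg.mpr (hmono (by omega) (by omega)))]
  -- case 4: tail region
  have hd4 : ∀ t, t < N-1 → k ≤ t → ¬(N % 2 = 1 ∧ t = k) → dfun t = gfun (2*(N-t)-3) := by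
    intro t ht hkt hno
    rw [hdfun, hgfun]
    simp only
    rw [af_hi a N (t+1) (by omega) (by omega) (by omega),
        af_hi a N t (by omega) (by omega) (by omega), abs_sub_comm,
        abs_of_nonneg (sub_nonneg.mpr (hmono (by omega) (by omega))),
        show 2*(N-1-t)+1 = 2*(N-t)-3+2 by omega, show 2*(N-1-(t+1))+1 = 2*(N-t)-3 by omega]
  -- nonemptiness and max? facts
  have hdne : diffL ≠ [] := by
    rw [hdiffL]
    simp only [ne_eq, List.map_eq_nil_iff, List.range_eq_nil]
    omega
  have hgne : gL ≠ [] := by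
    rw [hgL]
    simp
  obtain ⟨M, hM⟩ : ∃ M, PySem.List.max? diffL (fun x => x) = some M := by
    cases h : PySem.List.max? diffL (fun x => x) with
    | none => exact absurd ((PySem.List.max?_eq_none_iff _ _).mp h) hdne
    | some M => exact ⟨M, rfl⟩
  obtain ⟨B, hB⟩ : ∃ B, PySem.List.max? gL (fun x => x) = some B := by
    cases h : PySem.List.max? gL (fun x => x) with
    | none => exact absurd ((PySem.List.max?_eq_none_iff _ _).mp h) hgne
    | some B => exact ⟨B, rfl⟩
  have hMmem : M ∈ diffL := PySem.List.max?_mem hM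
  have hMub : ∀ y ∈ diffL, y ≤ M := fun y hy => PySem.List.max?_isMax hM y hy
  have hBmem : B ∈ gL := PySem.List.max?_mem hB
  have hBub : ∀ y ∈ gL, y ≤ B := fun y hy => PySem.List.max?_isMax hB y hy
  -- every diff is dominated by some gap
  have dom1 : ∀ t, t < N-1 → ∃ y ∈ gL, dfun t ≤ y := by
    intro t ht
    by_cases hc1 : t+1 < k
    · exact ⟨gfun (2*t), hg_mem (2*t) (by omega), le_of_eq (hd1 t hc1)⟩
    · by_cases hc2 : t+1 = k
      · have htk : t = k-1 := by omega
        by_cases hodd : N % 2 = 1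
        · exact ⟨_, hx_mem hodd, le_of_eq (htk ▸ hd2o hodd)⟩
        · have heven : N % 2 = 0 := by omega
          by_cases hk2 : 2 ≤ k
          · refine ⟨gfun (2*k-3), hg_mem _ (by omega), ?_⟩
            rw [htk, hd2e heven, hgfun]
            simp only
            have hle : a.getD (2*k-3) 0 ≤ a.getD (2*k-2) 0 := hmono (by omega) (by omega)
            rw [show 2*k-3+2 = 2*k-1 by omega]
            omega
          · refine ⟨w, hw_mem, ?_⟩
            rw [htk, hd2e heven, hw, show 2*k-1 = 1 by omega, show 2*k-2 = 0 by omega]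
      · have hkt : k ≤ t := by omega
        by_cases hc3 : N % 2 = 1 ∧ t = k
        · obtain ⟨hodd, htk⟩ := hc3
          refine ⟨_, hx_mem hodd, ?_⟩
          rw [htk, hd3 hodd]
          have hle : a.getD (2*k-2) 0 ≤ a.getD (2*k-1) 0 := hmono (by omega) (by omega)
          omega
        · exact ⟨gfun (2*(N-t)-3), hg_mem _ (by omega), le_of_eq (hd4 t ht hkt hc3)⟩
  -- every gap is at most max M w
  have dom2 : ∀ y ∈ gL, y ≤ max M w := by
    intro y hy
    rw [hgL] at hy
    simp only [List.mem_append, List.mem_map, List.mem_range, List.mem_singleton] at hy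
    rcases hy with ((⟨j, hj, rfl⟩ | rfl) | hyx)
    · by_cases hpar : j % 2 = 0
      · have hjt : j = 2*(j/2) := by omega
        have := hd1 (j/2) (by omega)
        have hmem := hMub _ (hd_mem (j/2) (by omega))
        rw [this, ← hjt] at hmem
        exact le_trans hmem (le_max_left _ _)
      · set t := N - j/2 - 2 with htdef
        have := hd4 t (by omega) (by omega) (by omega)
        have hje : 2*(N-t)-3 = j := by omega
        rw [hje] at this
        have hmem := hMub _ (hd_mem t (by omega))
        rw [this] at hmem
        exact le_trans hmem (le_max_left _ _)
    · exact le_max_right _ _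
    · by_cases hodd : N % 2 = 1
      · rw [if_pos hodd] at hyx
        simp only [List.mem_singleton] at hyx
        subst hyx
        have := hd2o hodd
        have hmem := hMub _ (hd_mem (k-1) (by omega))
        rw [this] at hmem
        exact le_trans hmem (le_max_left _ _)
      · rw [if_neg hodd] at hyx
        simp at hyx
  -- assemble
  rw [hM, hB, Option.getD_some, Option.getD_some]
  apply le_antisymm
  · apply max_le
    · obtain ⟨t, ht, hMt⟩ : ∃ t, t < N-1 ∧ dfun t = M := by
        rw [hdiffL] at hMmem
        simp only [List.mem_map, List.mem_range] at hMmem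
        obtain ⟨t, ht, he⟩ := hMmem
        exact ⟨t, ht, he⟩
      obtain ⟨y, hy, hley⟩ := dom1 t ht
      exact le_trans (hMt ▸ hley) (hBub y hy)
    · exact hBub w hw_mem
  · exact dom2 B hBmem

-- ===== VERDICT (by name: the statement is the Claim_ definition above) =====
theorem tree_level_spec : Claim_equal_tree_level := by
  intro n array _ hpre
  obtain ⟨h2, hm⟩ := hpre
  unfold Spec_tree_level
  rw [portA_eq n array h2 hm, portB_eq n array h2 hm]
  have hlen : (PySem.List.sorted array (fun x => x) false).length = array.length :=
    PySem.List.length_sorted ..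
  apply core_eq
  · exact PySem.List.sorted_pairwise ..
  · omega
  · have : (n / 2 : Int) = ((n.toNat / 2 : Nat) : Int) := by omega
    omega
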